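-- pv_equiv track=rewrite | github.com/HakimAmraoui/Advent_of_Code | 2019/day6.py | get_unique_answer_all
-- ===== SOURCE A (Python) =====
-- def get_unique_answer_all(responses):
--     questions = []
--     isInAllResponses = True
--
--     for char in responses[0]:
--         isInAllResponses = True
--         for line in responses:
--             if char not in line:
--                 isInAllResponses = False
--         if isInAllResponses and char not in questions:
--             questions.append(char)
--
--     return len(questions)
-- ===== SOURCE B (Python) =====
-- def get_unique_answer_all(responses):
--     common = set(responses[0])
--     for line in responses:
--         common &= set(line)
--     return len(common)
-- ===== Notes on version B (the rewrite author's own statement) =====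
-- stated objective: simpler
-- what changed: Replaces A's nested per-character rescanning of all responses with manual duplicate suppression by a single fold intersecting character sets, returning the size of the common set.
import Mathlib
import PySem

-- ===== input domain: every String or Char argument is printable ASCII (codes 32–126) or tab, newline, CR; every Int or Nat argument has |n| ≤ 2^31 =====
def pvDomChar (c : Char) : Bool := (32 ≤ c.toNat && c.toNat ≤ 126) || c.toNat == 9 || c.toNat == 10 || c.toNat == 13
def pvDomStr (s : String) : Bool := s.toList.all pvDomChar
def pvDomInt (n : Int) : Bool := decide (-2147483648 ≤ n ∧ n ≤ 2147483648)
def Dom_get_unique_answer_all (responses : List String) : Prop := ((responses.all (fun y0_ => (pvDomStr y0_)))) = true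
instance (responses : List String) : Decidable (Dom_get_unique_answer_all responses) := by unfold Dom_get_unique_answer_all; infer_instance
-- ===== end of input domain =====

-- B replaces A's nested per-character rescans (with manual dedup into a list) by one fold
-- intersecting character sets; objective: simpler.

-- ===== PORT A =====
-- 'char not in line' on a single character is exactly list membership of that character.
def get_unique_answer_all (responses : List String) : Int :=
  let questions := ((PySem.List.pyGet? responses 0).getD "").toList.foldl
    (fun (qs : List Char) ch =>
      let isInAllResponses := responses.foldl
        (fun (b : Bool) line => if !(line.toList.contains ch) then false else b) true
      if isInAllResponses && !(qs.contains ch) then qs ++ [ch] else qs) []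
  (questions.length : Int)

-- ===== PORT B =====
def get_unique_answer_all_alt (responses : List String) : Int :=
  let common := responses.foldl
    (fun (s : PySem.Set Char) line => PySem.Set.inter s (PySem.Set.ofList line.toList))
    (PySem.Set.ofList ((PySem.List.pyGet? responses 0).getD "").toList)
  (PySem.Set.len common : Int)

-- ===== PRECONDITION & SPEC =====
-- A evaluates responses[0], raising IndexError on an empty list; Pre_ excludes exactly that.
def Pre_get_unique_answer_all (responses : List String) : Prop := responses ≠ []
instance (responses : List String) : Decidable (Pre_get_unique_answer_all responses) := by unfold Pre_get_unique_answer_all; infer_instance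
def pvWitness_get_unique_answer_all : List String := ["ab", "b"]
def Spec_get_unique_answer_all (responses : List String) (out : Int) : Prop := out = get_unique_answer_all_alt responses
instance (responses : List String) (out : Int) : Decidable (Spec_get_unique_answer_all responses out) := by unfold Spec_get_unique_answer_all; infer_instance

-- ===== CLAIM (what is proved, stated in full; the proofs are below) =====
def Claim_equal_get_unique_answer_all : Prop := ∀ (responses : List String), Dom_get_unique_answer_all responses → Pre_get_unique_answer_all responses → Spec_get_unique_answer_all responses (get_unique_answer_all responses)

-- ===== LEMMAS AND PROOFS =====

-- A's inner loop over all responses computes 'every line contains ch'.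
theorem inner_foldl_eq_all (ch : Char) (rs : List String) (b : Bool) :
    rs.foldl (fun (b : Bool) line => if !(line.toList.contains ch) then false else b) b
      = (b && rs.all (fun l => l.toList.contains ch)) := by
  induction rs generalizing b with
  | nil => simp
  | cons l rs ih =>
    simp only [List.foldl_cons, List.all_cons, ih]
    cases h : l.toList.contains ch
    · simp [h]
    · simp

-- A's outer loop: the accumulated list stays Nodup and holds exactly the old
-- members plus the processed characters satisfying p.
theorem stepA_invariant (p : Char → Bool) (cs : List Char) (qs : List Char) (h : qs.Nodup) :
    (cs.foldl (fun (qs : List Char) ch =>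
        if p ch && !(qs.contains ch) then qs ++ [ch] else qs) qs).Nodup ∧
    ∀ x, x ∈ cs.foldl (fun (qs : List Char) ch =>
        if p ch && !(qs.contains ch) then qs ++ [ch] else qs) qs
      ↔ x ∈ qs ∨ (x ∈ cs ∧ p x = true) := by
  induction cs generalizing qs with
  | nil => simpa using h
  | cons c cs ih =>
    simp only [List.foldl_cons]
    by_cases hp : p c = true
    · by_cases hm : c ∈ qs
      · have : (if p c && !(qs.contains c) then qs ++ [c] else qs) = qs := by
          simp [hp, hm]
        rw [this]
        obtain ⟨h1, h2⟩ := ih qs h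
        refine ⟨h1, fun x => ?_⟩
        rw [h2 x]
        constructor
        · rintro (hx | ⟨hx, hpx⟩)
          · exact Or.inl hx
          · exact Or.inr ⟨List.mem_cons_of_mem _ hx, hpx⟩
        · rintro (hx | ⟨hx, hpx⟩)
          · exact Or.inl hx
          · rcases List.mem_cons.mp hx with rfl | hx
            · exact Or.inl hm
            · exact Or.inr ⟨hx, hpx⟩
      · have : (if p c && !(qs.contains c) then qs ++ [c] else qs) = qs ++ [c] := by
          simp [hp, hm]
        rw [this]
        have hnd : (qs ++ [c]).Nodup := by
          exact h.append (List.nodup_singleton c) (by simp [List.disjoint_singleton, hm])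
        obtain ⟨h1, h2⟩ := ih (qs ++ [c]) hnd
        refine ⟨h1, fun x => ?_⟩
        rw [h2 x]
        constructor
        · rintro (hx | ⟨hx, hpx⟩)
          · rcases List.mem_append.mp hx with hx | hx
            · exact Or.inl hx
            · simp only [List.mem_singleton] at hx
              subst hx
              exact Or.inr ⟨List.mem_cons_self .., hp⟩
          · exact Or.inr ⟨List.mem_cons_of_mem _ hx, hpx⟩
        · rintro (hx | ⟨hx, hpx⟩)
          · exact Or.inl (List.mem_append.mpr (Or.inl hx))
          · rcases List.mem_cons.mp hx with rfl | hx
            · exact Or.inl (List.mem_append.mpr (Or.inr (by simp)))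
            · exact Or.inr ⟨hx, hpx⟩
    · have : (if p c && !(qs.contains c) then qs ++ [c] else qs) = qs := by
        simp [hp]
      rw [this]
      obtain ⟨h1, h2⟩ := ih qs h
      refine ⟨h1, fun x => ?_⟩
      rw [h2 x]
      constructor
      · rintro (hx | ⟨hx, hpx⟩)
        · exact Or.inl hx
        · exact Or.inr ⟨List.mem_cons_of_mem _ hx, hpx⟩
      · rintro (hx | ⟨hx, hpx⟩)
        · exact Or.inl hx
        · rcases List.mem_cons.mp hx with rfl | hx
          · exact absurd hpx hp
          · exact Or.inr ⟨hx, hpx⟩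

-- B's fold of intersections: Nodup is preserved and membership is
-- 'in the initial set and in every line'.
theorem interFold_invariant (rs : List String) (s : PySem.Set Char) (h : s.Nodup) :
    (rs.foldl (fun (s : PySem.Set Char) line =>
        PySem.Set.inter s (PySem.Set.ofList line.toList)) s).Nodup ∧
    ∀ x, x ∈ rs.foldl (fun (s : PySem.Set Char) line =>
        PySem.Set.inter s (PySem.Set.ofList line.toList)) s
      ↔ x ∈ s ∧ ∀ l ∈ rs, x ∈ l.toList := by
  induction rs generalizing s with
  | nil => simpa using h
  | cons l rs ih =>
    simp only [List.foldl_cons]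
    obtain ⟨h1, h2⟩ := ih (PySem.Set.inter s (PySem.Set.ofList l.toList))
      (PySem.Set.nodup_inter s (PySem.Set.ofList l.toList) h)
    refine ⟨h1, fun x => ?_⟩
    rw [h2 x, PySem.Set.mem_inter, PySem.Set.mem_ofList]
    constructor
    · rintro ⟨⟨hs, hl⟩, hrest⟩
      refine ⟨hs, fun l' hl' => ?_⟩
      rcases List.mem_cons.mp hl' with rfl | hl'
      · exact hl
      · exact hrest l' hl'
    · rintro ⟨hs, hall⟩
      exact ⟨⟨hs, hall l (List.mem_cons_self ..)⟩,
        fun l' hl' => hall l' (List.mem_cons_of_mem _ hl')⟩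

-- ===== VERDICT (by name: the statement is the Claim_ definition above) =====
theorem get_unique_answer_all_spec : Claim_equal_get_unique_answer_all := by
  intro responses _ hpre
  unfold Spec_get_unique_answer_all get_unique_answer_all get_unique_answer_all_alt
  simp only [inner_foldl_eq_all, Bool.true_and]
  set first := ((PySem.List.pyGet? responses 0).getD "").toList with hfirst
  obtain ⟨ha1, ha2⟩ := stepA_invariant
    (fun ch => responses.all (fun l => l.toList.contains ch)) first [] (List.nodup_nil)
  obtain ⟨hb1, hb2⟩ := interFold_invariant responses (PySem.Set.ofList first)
    (PySem.Set.nodup_ofList first)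
  have hperm : (first.foldl (fun (qs : List Char) ch =>
      if responses.all (fun l => l.toList.contains ch) && !(qs.contains ch)
      then qs ++ [ch] else qs) []).Perm
      (responses.foldl (fun (s : PySem.Set Char) line =>
        PySem.Set.inter s (PySem.Set.ofList line.toList)) (PySem.Set.ofList first)) := by
    rw [List.perm_ext_iff_of_nodup ha1 hb1]
    intro x
    rw [ha2 x, hb2 x, PySem.Set.mem_ofList]
    simp only [List.mem_nil_iff, false_or, List.all_eq_true, List.contains_iff_mem]
  have hlen := hperm.length_eq
  simpa [PySem.Set.len] using hlen
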